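-- pv_equiv track=rewrite | github.com/mayosupport/Advent-Of-Code | 2024/day8/pt2.py | find_all_pairs
-- ===== SOURCE A (Python) =====
-- def find_all_pairs(grid):
--     identified_char_positions = {}
--     identified_char_pairs = {}
--
--     for idx, line in enumerate(grid):
--         for jdx, char in enumerate(line):
--
--             if char == '.':
--                 continue
--
--             curr_position = (idx, jdx)
--             if char in identified_char_positions.keys():
--                 for prev_position in identified_char_positions[char]:
--                     identified_char_pairs[char].append((curr_position, prev_position))
--                 identified_char_positions[char].append(curr_position)
--             else:
--                 identified_char_positions[char] = [(idx, jdx)]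
--                 identified_char_pairs[char] = []
--
--     from pprint import pprint
--     pprint(identified_char_pairs)
--
--     return identified_char_pairs
-- ===== SOURCE B (Python) =====
-- def find_all_pairs(grid):
--     # Flatten the grid once into a cell list; derive keys in first-occurrence
--     # order; then regenerate each char's pair list from the full cross product
--     # of its cells, keeping (p, q) exactly when q is at a lexicographically
--     # smaller coordinate than p (row-major scan order == coordinate order, so
--     # the comprehension emits A's (later, earlier) pairs in A's order).
--     cells = [(char, (idx, jdx))
--              for idx, line in enumerate(grid)
--              for jdx, char in enumerate(line)
--              if char != '.']
--
--     pairs = {}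
--     for char, _ in cells:
--         if char not in pairs:
--             pairs[char] = []
--
--     for char in pairs:
--         ps = [pos for c, pos in cells if c == char]
--         pairs[char] = [(p, q) for p in ps for q in ps if q < p]
--
--     return pairs
-- ===== Notes on version B (the rewrite author's own statement) =====
-- stated objective: alternative
-- what changed: A pairs each non-'.' cell with the previously seen positions of its char while scanning, maintaining both dicts incrementally; B flattens the grid into a cell list once, derives the key set from it, and regenerates each char's pair list non-incrementally as the cross product of its positions filtered by lexicographic coordinate comparison (q < p), with no 'seen so far' state; B does not reproduce A's pprint side effect (return values are equal).
import Mathlib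
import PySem

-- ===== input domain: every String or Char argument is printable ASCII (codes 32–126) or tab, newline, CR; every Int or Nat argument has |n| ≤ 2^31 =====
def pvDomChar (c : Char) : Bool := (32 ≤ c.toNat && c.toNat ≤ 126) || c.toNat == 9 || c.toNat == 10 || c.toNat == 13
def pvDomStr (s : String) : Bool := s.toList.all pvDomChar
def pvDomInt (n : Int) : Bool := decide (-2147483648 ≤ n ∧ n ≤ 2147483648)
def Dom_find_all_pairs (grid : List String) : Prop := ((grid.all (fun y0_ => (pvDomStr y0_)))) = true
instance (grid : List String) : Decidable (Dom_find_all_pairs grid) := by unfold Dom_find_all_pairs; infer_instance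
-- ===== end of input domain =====

-- B drops A's incremental 'seen so far' pairing in favour of a flattened cell list whose per-char
-- cross product is filtered by coordinate comparison ('alternative' objective); equivalence is about
-- the RETURN value only: A also pprints the dict, B does not print.

-- ===== PORT A =====
def find_all_pairs (grid : List String) : List (String × List ((Int × Int) × (Int × Int))) :=
  let st :=
    (PySem.List.enumerate grid 0).foldl (fun st p =>
      (PySem.List.enumerate p.2.toList 0).foldl (fun st q =>
        if q.2 == '.' then st
        else
          let ch := String.ofList [q.2]
          let curr : Int × Int := (p.1, q.1)
          match st.1.get? ch with
          | some prevs =>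
              (st.1.insert ch (prevs ++ [curr]),
               -- the Python appends (curr, prev) to pairs[char] for each prev
               st.2.modify ch [] (fun pl =>
                 prevs.foldl (fun acc prev => acc ++ [(curr, prev)]) pl))
          | none => (st.1.insert ch [curr], st.2.insert ch [])) st)
      ((PySem.Dict.empty : PySem.Dict String (List (Int × Int))),
       (PySem.Dict.empty : PySem.Dict String (List ((Int × Int) × (Int × Int)))))
  st.2.items

-- ===== PORT B =====
-- Python's tuple comparison 'q < p' on pairs of ints (lexicographic); hand-ported, exact for 2-tuples of ints
def pvLtPos (q p : Int × Int) : Bool := q.1 < p.1 || (q.1 == p.1 && q.2 < p.2)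

-- cells = [(char, (idx, jdx)) for idx, line in … for jdx, char in … if char != '.']
def pvCells (grid : List String) : List (String × (Int × Int)) :=
  (PySem.List.enumerate grid 0).flatMap (fun p =>
    ((PySem.List.enumerate p.2.toList 0).filter (fun q => q.2 != '.')).map
      (fun q => (String.ofList [q.2], (p.1, q.1))))

-- [(p, q) for p in ps for q in ps if q < p]
def pvCrossPairs (ps : List (Int × Int)) : List ((Int × Int) × (Int × Int)) :=
  ps.flatMap (fun p => (ps.filter (fun q => pvLtPos q p)).map (fun q => (p, q)))

def find_all_pairs_alt (grid : List String) : List (String × List ((Int × Int) × (Int × Int))) :=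
  let cells := pvCells grid
  -- for char, _ in cells: if char not in pairs: pairs[char] = []
  let d0 := cells.foldl (fun d c =>
      if d.contains c.1 then d
      else d.insert c.1 ([] : List ((Int × Int) × (Int × Int))))
    PySem.Dict.empty
  -- for char in pairs: ps = [pos for c, pos in cells if c == char]; pairs[char] = [(p,q) for p in ps for q in ps if q < p]
  let res := d0.keys.foldl (fun d ch =>
      d.insert ch (pvCrossPairs ((cells.filter (fun c => c.1 == ch)).map (·.2)))) d0
  res.items

-- ===== PRECONDITION & SPEC =====
def Spec_find_all_pairs (grid : List String) (out : List (String × List ((Int × Int) × (Int × Int)))) : Prop := out = find_all_pairs_alt grid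
instance (grid : List String) (out : List (String × List ((Int × Int) × (Int × Int)))) : Decidable (Spec_find_all_pairs grid out) := by unfold Spec_find_all_pairs; infer_instance

-- ===== CLAIM (what is proved, stated in full; the proofs are below) =====
def Claim_equal_find_all_pairs : Prop := ∀ (grid : List String), Dom_find_all_pairs grid → Spec_find_all_pairs grid (find_all_pairs grid)

-- ===== LEMMAS AND PROOFS =====

-- A's incremental position dict, in the 'modify' form
def pvPosDict (grid : List String) : PySem.Dict String (List (Int × Int)) :=
  (PySem.List.enumerate grid 0).foldl (fun d p =>
    (PySem.List.enumerate p.2.toList 0).foldl (fun d q =>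
      if q.2 != '.' then d.modify (String.ofList [q.2]) [] (fun pl => pl ++ [(p.1, q.1)])
      else d) d)
    PySem.Dict.empty

-- 'pair each position with the earlier ones of its list' (index-based common specification)
def pvCharPairs (l : List (Int × Int)) : List ((Int × Int) × (Int × Int)) :=
  (PySem.List.enumerate l 0).foldl (fun acc p =>
    (PySem.List.slice l none (some p.1)).foldl (fun acc prev => acc ++ [(p.2, prev)]) acc) []

-- value-map of a position dict into a pair dict (stated on dicts; used as the fold invariant)
def pvMapF (d : PySem.Dict String (List (Int × Int))) :
    PySem.Dict String (List ((Int × Int) × (Int × Int))) :=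
  PySem.Dict.mk (d.items.map (fun kv => (kv.1, pvCharPairs kv.2)))

theorem pvGet?_mapF (d : PySem.Dict String (List (Int × Int))) (k : String) :
    (pvMapF d).get? k = (d.get? k).map pvCharPairs := by
  obtain ⟨l⟩ := d
  induction l with
  | nil => rfl
  | cons hd tl ih =>
      show (PySem.Dict.mk ((hd.1, pvCharPairs hd.2) :: tl.map (fun kv => (kv.1, pvCharPairs kv.2)))).get? k
          = Option.map pvCharPairs ((PySem.Dict.mk (hd :: tl)).get? k)
      rw [PySem.Dict.get?_mk_cons, PySem.Dict.get?_mk_cons]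
      by_cases h : hd.1 == k
      · simp [h]
      · simp only [h, Bool.false_eq_true, if_false]
        exact ih

theorem pvMapF_insert (d : PySem.Dict String (List (Int × Int))) (k : String)
    (v : List (Int × Int)) :
    pvMapF (d.insert k v) = (pvMapF d).insert k (pvCharPairs v) := by
  have hc : (pvMapF d).contains k = d.contains k := by
    simp [PySem.Dict.contains_eq_decide_mem_keys, PySem.Dict.keys, pvMapF]
  apply PySem.Dict.ext
  have hL : (pvMapF (d.insert k v)).items
      = (d.insert k v).items.map (fun kv => (kv.1, pvCharPairs kv.2)) := rfl
  have hM : (pvMapF d).items = d.items.map (fun kv => (kv.1, pvCharPairs kv.2)) := rfl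
  rw [hL, PySem.Dict.items_insert, PySem.Dict.items_insert, hc, hM]
  split_ifs with h
  · rw [List.map_map, List.map_map]
    apply List.map_congr_left
    intro p _
    by_cases hp : p.1 == k <;> simp [Function.comp, hp]
  · simp

theorem pvCharPairs_append (l : List (Int × Int)) (c : Int × Int) :
    pvCharPairs (l ++ [c]) = pvCharPairs l ++ l.map (fun prev => (c, prev)) := by
  unfold pvCharPairs
  have hbody : ∀ (xs : List (Int × (Int × Int))) (acc : List ((Int × Int) × (Int × Int))),
      (∀ p ∈ xs, ∃ n : Nat, p.1 = (n : Int) ∧ n ≤ l.length) →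
      xs.foldl (fun acc p =>
          (PySem.List.slice (l ++ [c]) none (some p.1)).foldl
            (fun acc prev => acc ++ [(p.2, prev)]) acc) acc =
      xs.foldl (fun acc p =>
          (PySem.List.slice l none (some p.1)).foldl
            (fun acc prev => acc ++ [(p.2, prev)]) acc) acc := by
    intro xs
    induction xs with
    | nil => intro acc _; rfl
    | cons hd tl ih =>
        intro acc hmem
        obtain ⟨n, hn, hle⟩ := hmem hd (by simp)
        simp only [List.foldl_cons]
        rw [ih _ (fun p hp => hmem p (List.mem_cons_of_mem _ hp))]
        congr 2
        rw [hn, PySem.List.slice_to_natCast, PySem.List.slice_to_natCast,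
            List.take_append_of_le_length hle]
  rw [hbody _ _ (by
    intro p hp
    rw [PySem.List.mem_enumerate_iff] at hp
    obtain ⟨k, hk, rfl⟩ := hp
    refine ⟨k, by simp, ?_⟩
    simp only [List.length_append, List.length_cons, List.length_nil] at hk
    omega)]
  rw [PySem.List.enumerate_append]
  rw [List.foldl_append]
  simp only [PySem.List.enumerate_cons, PySem.List.enumerate_nil, List.foldl_cons,
    List.foldl_nil, zero_add]
  rw [PySem.List.slice_to_natCast, List.take_length,
    PySem.List.foldl_append_singleton_eq_map]

-- generic paired-fold lemma: if one step preserves the relation st = (s, g s), the fold does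
theorem pvPairFold {α σ τ : Type} (g : σ → τ) (fA : σ × τ → α → σ × τ) (fB : σ → α → σ)
    (h : ∀ s x, fA (s, g s) x = (fB s x, g (fB s x))) :
    ∀ (xs : List α) (s : σ), xs.foldl fA (s, g s) = (xs.foldl fB s, g (xs.foldl fB s)) := by
  intro xs
  induction xs with
  | nil => intro s; rfl
  | cons hd tl ih => intro s; simp only [List.foldl_cons, h]; exact ih _

-- the cell-level step of A preserves the invariant 'pairs = pvMapF positions'
theorem pvCellStep (pos : PySem.Dict String (List (Int × Int))) (i : Int) (q : Int × Char) :
    (if q.2 == '.' then (pos, pvMapF pos)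
     else
       let ch := String.ofList [q.2]
       let curr : Int × Int := (i, q.1)
       match pos.get? ch with
       | some prevs =>
           (pos.insert ch (prevs ++ [curr]),
            (pvMapF pos).modify ch [] (fun pl =>
              prevs.foldl (fun acc prev => acc ++ [(curr, prev)]) pl))
       | none => (pos.insert ch [curr], (pvMapF pos).insert ch [])) =
    (if q.2 != '.' then pos.modify (String.ofList [q.2]) [] (fun pl => pl ++ [(i, q.1)]) else pos,
     pvMapF (if q.2 != '.' then pos.modify (String.ofList [q.2]) [] (fun pl => pl ++ [(i, q.1)]) else pos)) := by
  by_cases hdot : q.2 == '.'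
  · have h2 : (q.2 != '.') = false := by simp [bne, hdot]
    rw [if_pos hdot, if_neg (by simp [h2])]
  · have h1 : (q.2 == '.') = false := by simp_all
    have h2 : (q.2 != '.') = true := by simp [bne, h1]
    rw [if_neg (by simp [h1]), if_pos (by simp [h2])]
    set ch := String.ofList [q.2]
    set curr : Int × Int := (i, q.1)
    have hmod : pos.modify ch [] (fun pl => pl ++ [curr]) =
        pos.insert ch (pos.getD ch [] ++ [curr]) := rfl
    cases hget : pos.get? ch with
    | some prevs =>
        have hgd : pos.getD ch [] = prevs := by
          rw [PySem.Dict.getD_eq_get?_getD, hget]; rfl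
        have hgd2 : (pvMapF pos).getD ch [] = pvCharPairs prevs := by
          rw [PySem.Dict.getD_eq_get?_getD, pvGet?_mapF, hget]; rfl
        have hmod2 : (pvMapF pos).modify ch [] (fun pl =>
            prevs.foldl (fun acc prev => acc ++ [(curr, prev)]) pl) =
            (pvMapF pos).insert ch (pvCharPairs prevs ++ prevs.map (fun prev => (curr, prev))) := by
          show (pvMapF pos).insert ch _ = _
          rw [hgd2]
          simp only [PySem.List.foldl_append_singleton_eq_map]
        simp only [hget, hmod, hmod2, hgd]
        rw [pvMapF_insert, pvCharPairs_append]
    | none =>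
        have hgd : pos.getD ch [] = [] := by
          rw [PySem.Dict.getD_eq_get?_getD, hget]; rfl
        simp only [hget, hmod, hgd, List.nil_append]
        rw [pvMapF_insert]
        rfl

-- the line-level step of A preserves the invariant (by pvPairFold on the inner fold)
theorem pvLineStep (pos : PySem.Dict String (List (Int × Int))) (p : Int × String) :
    (PySem.List.enumerate p.2.toList 0).foldl (fun st q =>
      if q.2 == '.' then st
      else
        let ch := String.ofList [q.2]
        let curr : Int × Int := (p.1, q.1)
        match st.1.get? ch with
        | some prevs =>
            (st.1.insert ch (prevs ++ [curr]),
             st.2.modify ch [] (fun pl =>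
               prevs.foldl (fun acc prev => acc ++ [(curr, prev)]) pl))
        | none => (st.1.insert ch [curr], st.2.insert ch [])) (pos, pvMapF pos) =
    (let pos' := (PySem.List.enumerate p.2.toList 0).foldl (fun d q =>
        if q.2 != '.' then d.modify (String.ofList [q.2]) [] (fun pl => pl ++ [(p.1, q.1)])
        else d) pos
     (pos', pvMapF pos')) := by
  exact pvPairFold pvMapF _ _ (fun s x => pvCellStep s p.1 x) _ pos

-- A's result, characterised through pvPosDict
theorem pvA_eq (grid : List String) :
    find_all_pairs grid = (pvMapF (pvPosDict grid)).items := by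
  unfold find_all_pairs pvPosDict
  have hempty : (PySem.Dict.empty : PySem.Dict String (List ((Int × Int) × (Int × Int)))) =
      pvMapF PySem.Dict.empty := rfl
  rw [hempty]
  rw [pvPairFold pvMapF _ _ (fun s p => pvLineStep s p)]

-- A's position dict IS the single grouping fold over the flattened cell list
theorem pvPosDict_eq_cells_fold (grid : List String) :
    pvPosDict grid = (pvCells grid).foldl
      (fun d c => d.modify c.1 [] (fun pl => pl ++ [c.2])) PySem.Dict.empty := by
  unfold pvPosDict pvCells
  rw [List.foldl_flatMap]
  apply PySem.List.foldl_congr_mem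
  intro d p _
  rw [PySem.List.foldl_if_eq_foldl_filter, List.foldl_map]

-- Python's '<' on int pairs, as a Prop
def pvLtP (q p : Int × Int) : Prop := q.1 < p.1 ∨ (q.1 = p.1 ∧ q.2 < p.2)

theorem pvLtPos_of (q p : Int × Int) (h : pvLtP q p) : pvLtPos q p = true := by
  unfold pvLtP at h
  simp only [pvLtPos, Bool.or_eq_true, Bool.and_eq_true, decide_eq_true_eq, beq_iff_eq]
  omega

theorem pvLtPos_false_of (q p : Int × Int) (h : pvLtP p q) : pvLtPos q p = false := by
  unfold pvLtP at h
  simp only [pvLtPos, Bool.or_eq_false_iff, Bool.and_eq_false_iff, decide_eq_false_iff_not,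
    beq_eq_false_iff_ne, ne_eq, not_lt]
  omega

theorem pvLtPos_irrefl (p : Int × Int) : pvLtPos p p = false := by
  simp [pvLtPos]

-- on a strictly increasing position list, the coordinate-filtered cross product
-- is exactly 'each element paired with the earlier ones'
theorem pvCrossPairs_eq (ps : List (Int × Int)) (h : ps.Pairwise pvLtP) :
    pvCrossPairs ps = pvCharPairs ps := by
  induction ps using List.reverseRecOn with
  | nil => rfl
  | append_singleton l c ih =>
      obtain ⟨hl, -, hlc⟩ := List.pairwise_append.mp h
      have hlc' : ∀ q ∈ l, pvLtP q c := fun q hq => hlc q hq c (by simp)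
      unfold pvCrossPairs
      rw [List.flatMap_append]
      have h1 : l.flatMap (fun p => ((l ++ [c]).filter (fun q => pvLtPos q p)).map (fun q => (p, q)))
          = l.flatMap (fun p => (l.filter (fun q => pvLtPos q p)).map (fun q => (p, q))) := by
        apply List.flatMap_congr
        intro p hp
        rw [List.filter_append]
        have : [c].filter (fun q => pvLtPos q p) = [] := by
          simp [List.filter, pvLtPos_false_of c p (hlc' p hp)]
        rw [this, List.append_nil]
      have h2 : [c].flatMap (fun p => ((l ++ [c]).filter (fun q => pvLtPos q p)).map (fun q => (p, q)))
          = l.map (fun q => (c, q)) := by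
        simp only [List.flatMap_cons, List.flatMap_nil, List.append_nil]
        rw [List.filter_append]
        have hc1 : l.filter (fun q => pvLtPos q c) = l :=
          List.filter_eq_self.mpr (fun q hq => pvLtPos_of q c (hlc' q hq))
        have hc2 : [c].filter (fun q => pvLtPos q c) = [] := by
          simp [List.filter, pvLtPos_irrefl]
        rw [hc1, hc2, List.append_nil]
      rw [h1, h2, pvCharPairs_append, ← ih hl]
      rfl

-- the flattened cell list is strictly increasing in its positions
theorem pvCells_pairwise (grid : List String) :
    (pvCells grid).Pairwise (fun a b => pvLtP a.2 b.2) := by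
  unfold pvCells
  have hk : ∀ (line : Int × String) (a : String × (Int × Int)),
      a ∈ ((PySem.List.enumerate line.2.toList 0).filter (fun q => q.2 != '.')).map
        (fun q => (String.ofList [q.2], (line.1, q.1))) → a.2.1 = line.1 := by
    intro line a ha
    obtain ⟨q, -, rfl⟩ := List.mem_map.mp ha
    rfl
  apply List.pairwise_flatMap.mpr
  constructor
  · intro p _
    apply List.Pairwise.map
    case H =>
      exact fun q q' (hq : q.1 < q'.1) => Or.inr ⟨rfl, hq⟩
    exact List.Pairwise.sublist List.filter_sublist (PySem.List.pairwise_lt_enumerate p.2.toList 0)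
  · apply (PySem.List.pairwise_lt_enumerate grid 0).imp_of_mem
    intro p p' _ _ hlt x hx y hy
    exact Or.inl (by rw [hk p x hx, hk p' y hy]; exact hlt)

-- key set of B's first loop ('if char not in pairs: pairs[char] = []')
theorem pvKeysIf (l : List (String × (Int × Int)))
    (d : PySem.Dict String (List ((Int × Int) × (Int × Int)))) :
    (l.foldl (fun d c =>
        if d.contains c.1 then d
        else d.insert c.1 ([] : List ((Int × Int) × (Int × Int)))) d).keys
      = PySem.Set.update d.keys (l.map (·.1)) := by
  induction l generalizing d with
  | nil => rfl
  | cons c l ih =>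
      simp only [List.foldl_cons, List.map_cons, PySem.Set.update_cons]
      rw [ih]
      congr 1
      by_cases h : d.contains c.1
      · rw [if_pos h, PySem.Set.add_of_mem ((PySem.Dict.contains_iff_mem_keys d c.1).mp h)]
      · rw [if_neg h,
          PySem.Dict.keys_insert_of_not_contains d _ (by simpa using h),
          PySem.Set.add_of_not_mem
            (fun hm => h ((PySem.Dict.contains_iff_mem_keys d c.1).mpr hm))]

-- overwriting every existing key leaves the items list in place, values replaced
theorem pvItemsOverwrite (v : String → List ((Int × Int) × (Int × Int))) :
    ∀ (ks : List String) (d : PySem.Dict String (List ((Int × Int) × (Int × Int)))),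
      (∀ k ∈ ks, d.contains k = true) →
      (ks.foldl (fun d ch => d.insert ch (v ch)) d).items
        = d.items.map (fun kv => if kv.1 ∈ ks then (kv.1, v kv.1) else kv) := by
  intro ks
  induction ks with
  | nil => intro d _; simp
  | cons k ks ih =>
      intro d hks
      have hdk : d.contains k = true := hks k (List.mem_cons_self)
      rw [List.foldl_cons,
        ih _ (fun k' hk' => by
          rw [PySem.Dict.contains_insert]
          simp [hks k' (List.mem_cons_of_mem _ hk')]),
        PySem.Dict.items_insert_of_contains d _ hdk, List.map_map]
      apply List.map_congr_left
      intro p _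
      by_cases hp : p.1 = k <;> simp [Function.comp, hp]

-- ===== VERDICT (by name: the statement is the Claim_ definition above) =====
theorem find_all_pairs_spec : Claim_equal_find_all_pairs := by
  intro grid _
  show find_all_pairs grid = find_all_pairs_alt grid
  -- abbreviations
  have hA := pvA_eq grid
  rw [pvPosDict_eq_cells_fold] at hA
  set cells := pvCells grid with hcells
  set pos := cells.foldl (fun d c => d.modify c.1 [] (fun pl => pl ++ [c.2]))
    (PySem.Dict.empty : PySem.Dict String (List (Int × Int))) with hpos
  set d0 := cells.foldl (fun d c =>
      if d.contains c.1 then d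
      else d.insert c.1 ([] : List ((Int × Int) × (Int × Int))))
    (PySem.Dict.empty : PySem.Dict String (List ((Int × Int) × (Int × Int)))) with hd0
  -- A's result as a map over pos.keys
  have hnodup : pos.keys.Nodup := by
    rw [hpos]
    exact PySem.Dict.nodup_keys_foldl_modify_key cells (fun c => c.1) []
      (fun _ c => (fun pl => pl ++ [c.2])) PySem.Dict.empty PySem.Dict.nodup_keys_empty
  have hAmap : find_all_pairs grid
      = pos.keys.map (fun k => (k, pvCharPairs (pos.getD k []))) := by
    rw [hA]
    show (pvMapF pos).items = _
    have : (pvMapF pos).items = pos.items.map (fun kv => (kv.1, pvCharPairs kv.2)) := rfl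
    rw [this, PySem.Dict.items_eq_map_keys pos hnodup [], List.map_map]
    rfl
  -- B's result as a map over d0.keys
  have hBmap : find_all_pairs_alt grid
      = d0.keys.map (fun k =>
          (k, pvCrossPairs ((cells.filter (fun c => c.1 == k)).map (·.2)))) := by
    show (d0.keys.foldl (fun d ch =>
        d.insert ch (pvCrossPairs ((cells.filter (fun c => c.1 == ch)).map (·.2)))) d0).items = _
    rw [pvItemsOverwrite _ d0.keys d0
      (fun k hk => (PySem.Dict.contains_iff_mem_keys d0 k).mpr hk)]
    have h1 : d0.items.map (fun kv =>
        if kv.1 ∈ d0.keys then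
          (kv.1, pvCrossPairs ((cells.filter (fun c => c.1 == kv.1)).map (·.2)))
        else kv)
        = d0.items.map (fun kv =>
          (kv.1, pvCrossPairs ((cells.filter (fun c => c.1 == kv.1)).map (·.2)))) := by
      apply List.map_congr_left
      intro p hp
      rw [if_pos (PySem.Dict.mem_keys_of_mem_items d0 hp)]
    rw [h1]
    show _ = (d0.items.map (·.1)).map _
    rw [List.map_map]
    rfl
  -- the two key lists agree
  have hkeys : pos.keys = d0.keys := by
    rw [hpos, hd0,
      PySem.Dict.keys_foldl_modify_key cells (fun c => c.1) []
        (fun _ c => (fun pl => pl ++ [c.2])) PySem.Dict.empty,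
      pvKeysIf]
    rfl
  -- the two per-key values agree
  have hval : ∀ k : String,
      pvCharPairs (pos.getD k [])
        = pvCrossPairs ((cells.filter (fun c => c.1 == k)).map (·.2)) := by
    intro k
    have hgd : pos.getD k [] = (cells.filter (fun c => c.1 == k)).map (·.2) := by
      rw [hpos, PySem.Dict.getD_foldl_modify_append cells PySem.Dict.empty k,
        PySem.Dict.getD_empty, List.nil_append]
    have hpw : ((cells.filter (fun c => c.1 == k)).map (·.2)).Pairwise pvLtP := by
      apply List.Pairwise.map
      case H => exact fun a b h => h
      exact List.Pairwise.sublist List.filter_sublist (pvCells_pairwise grid)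
    rw [hgd, pvCrossPairs_eq _ hpw]
  rw [hAmap, hBmap, hkeys]
  apply List.map_congr_left
  intro k _
  rw [hval k]
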